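-- pv_equiv track=rewrite | github.com/bashbaug/adventofcode_2023 | day12/go.py | find_min_remaining
-- ===== SOURCE A (Python) =====
-- def find_min_remaining(record):
--     remaining = []
--     for c in range(len(record)):
--         started = False
--         count = 0
--         for i in range(c, len(record)):
--             if record[i] == '#':
--                 started = True
--             if record[i] == '.' and started:
--                 started = False
--                 count = count + 1
--         if started:
--             count = count + 1
--         remaining.append(count)
--     return remaining
-- ===== SOURCE B (Python) =====
-- def find_min_remaining(record):
--     n = len(record)
--     res = [0] * n
--     nxt = 0
--     seen = False  # does the current '.'-free segment to the right contain a '#'?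
--     for c in range(n - 1, -1, -1):
--         ch = record[c]
--         if ch == '.':
--             seen = False
--         if ch == '#' and not seen:
--             nxt += 1
--         if ch == '#':
--             seen = True
--         res[c] = nxt
--     return res
-- ===== Notes on version B (the rewrite author's own statement) =====
-- stated objective: faster
-- what changed: replaced the per-start-index rescan of the whole suffix by a single right-to-left pass that keeps a running count of group starts (suffix sums)
import Mathlib
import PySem

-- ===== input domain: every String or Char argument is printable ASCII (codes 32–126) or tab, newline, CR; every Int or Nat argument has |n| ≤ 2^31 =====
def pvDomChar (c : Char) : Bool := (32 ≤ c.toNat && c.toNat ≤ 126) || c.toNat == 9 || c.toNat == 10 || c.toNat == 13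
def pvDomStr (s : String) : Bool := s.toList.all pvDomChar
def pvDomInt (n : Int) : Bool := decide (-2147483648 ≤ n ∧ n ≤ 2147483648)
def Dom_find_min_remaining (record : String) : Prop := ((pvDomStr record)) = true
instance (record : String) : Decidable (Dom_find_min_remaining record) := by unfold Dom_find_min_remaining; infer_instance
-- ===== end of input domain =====

-- B replaces A's quadratic per-start rescan of the suffix by one right-to-left pass with a running count.

-- ===== PORT A =====
-- A's inner-loop body: update (started, count) on one character
def pvStepA (sc : Bool × Int) (ch : Char) : Bool × Int :=
  let started := if ch = '#' then true else sc.1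
  if ch = '.' ∧ started then (false, sc.2 + 1) else (started, sc.2)

-- literal transliteration of A: outer loop over start indices, inner loop rescanning the suffix
def find_min_remaining (record : String) : List Int :=
  let l := record.toList
  let n : Int := (l.length : Int)
  (PySem.List.pyRange 0 n 1).foldl (fun remaining c =>
    let st := (PySem.List.pyRange c n 1).foldl
      (fun sc i => pvStepA sc (PySem.List.pyGetD l i ' ')) (false, 0)
    remaining ++ [if st.1 then st.2 + 1 else st.2]) []

-- ===== PORT B =====
-- B's loop body: one character, right to left; state (running count, seen-'#'-in-segment, result)
def pvStepB (st : Int × Bool × List Int) (ch : Char) : Int × Bool × List Int :=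
  let seen := if ch = '.' then false else st.2.1
  let nxt := if ch = '#' ∧ ¬ seen then st.1 + 1 else st.1
  let seen' := if ch = '#' then true else seen
  (nxt, seen', nxt :: st.2.2)

-- B: single right-to-left pass
def find_min_remaining_alt (record : String) : List Int :=
  (record.toList.reverse.foldl pvStepB ((0 : Int), false, ([] : List Int))).2.2

-- ===== PRECONDITION & SPEC =====
def Spec_find_min_remaining (record : String) (out : List Int) : Prop := out = find_min_remaining_alt record
instance (record : String) (out : List Int) : Decidable (Spec_find_min_remaining record out) := by unfold Spec_find_min_remaining; infer_instance

-- ===== CLAIM (what is proved, stated in full; the proofs are below) =====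
def Claim_equal_find_min_remaining : Prop := ∀ (record : String), Dom_find_min_remaining record → Spec_find_min_remaining record (find_min_remaining record)

-- ===== LEMMAS AND PROOFS =====

-- group count of a char list, starting with flag s (A's inner loop, expressed structurally)
def pvG (s : Bool) : List Char → Int
  | [] => if s then 1 else 0
  | c :: t =>
    let s' := if c = '#' then true else s
    if c = '.' ∧ s' then 1 + pvG false t else pvG s' t

-- does the leading '.'-free segment contain a '#'?
def pvSeen : List Char → Bool
  | [] => false
  | c :: t => if c = '.' then false else (if c = '#' then true else pvSeen t)

-- the intended result: group counts of all proper suffixes, longest first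
def pvCounts : List Char → List Int
  | [] => []
  | c :: t => pvG false (c :: t) :: pvCounts t

lemma pvG_true (t : List Char) :
    pvG true t = (if pvSeen t then 0 else 1) + pvG false t := by
  induction t with
  | nil => simp [pvG, pvSeen]
  | cons c r ih =>
    by_cases h1 : c = '.'
    · subst h1; simp [pvG, pvSeen]; try ring
    · by_cases h2 : c = '#'
      · subst h2; simp [pvG, pvSeen]
      · simp [pvG, pvSeen, h1, h2, ih]

-- A's inner fold computes pvG (plus the accumulated count)
lemma pvG_fold (t : List Char) (s : Bool) (k : Int) :
    (if (t.foldl pvStepA (s, k)).1 then (t.foldl pvStepA (s, k)).2 + 1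
     else (t.foldl pvStepA (s, k)).2) = k + pvG s t := by
  induction t generalizing s k with
  | nil => simp only [List.foldl_nil, pvG]; split <;> ring
  | cons c r ih =>
    rw [List.foldl_cons]
    by_cases h1 : c = '.'
    · by_cases hs : s
      · have h : pvStepA (s, k) c = (false, k + 1) := by
          subst h1; simp [pvStepA, hs]
        rw [h, ih]
        subst h1; simp [pvG, hs]; ring
      · have h : pvStepA (s, k) c = (false, k) := by
          subst h1; simp [pvStepA, hs]
        rw [h, ih]
        have hs' : s = false := by simpa using hs
        subst h1; subst hs'; simp [pvG]
    · by_cases h2 : c = '#'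
      · have h : pvStepA (s, k) c = (true, k) := by
          subst h2; simp [pvStepA, h1]
        rw [h, ih]
        subst h2; simp [pvG, h1]
      · have h : pvStepA (s, k) c = (s, k) := by
          simp [pvStepA, h1, h2]
        rw [h, ih]
        simp [pvG, h1, h2]

-- B's pass, read as a foldr, maintains (pvG false, pvSeen, pvCounts)
lemma pvB_foldr (l : List Char) :
    l.foldr (fun ch st => pvStepB st ch) ((0 : Int), false, ([] : List Int))
      = (pvG false l, pvSeen l, pvCounts l) := by
  induction l with
  | nil => simp [pvG, pvSeen, pvCounts]
  | cons c t ih =>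
    rw [List.foldr_cons, ih]
    by_cases h1 : c = '.'
    · subst h1; simp [pvStepB, pvG, pvSeen, pvCounts]
    · by_cases h2 : c = '#'
      · subst h2
        simp [pvStepB, pvG, pvSeen, pvCounts, h1, pvG_true]
        by_cases hv : pvSeen t
        · simp [hv]
        · simp [hv]; ring
      · simp [pvStepB, pvG, pvSeen, pvCounts, h1, h2]

-- the map-over-suffixes form equals pvCounts
lemma pvCounts_eq_map (l : List Char) :
    (List.range l.length).map (fun k => pvG false (l.drop k)) = pvCounts l := by
  induction l with
  | nil => simp [pvCounts]
  | cons c t ih =>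
    rw [show (c :: t).length = t.length + 1 from rfl, List.range_succ_eq_map,
        List.map_cons, List.map_map]
    simp only [List.drop_zero]
    rw [show ((fun k => pvG false ((c :: t).drop k)) ∘ Nat.succ)
          = (fun k => pvG false (t.drop k)) from funext (fun k => rfl), ih]
    rfl

-- A computes pvCounts
lemma pvA_eq (record : String) :
    find_min_remaining record = pvCounts record.toList := by
  unfold find_min_remaining
  set l := record.toList with hl
  rw [PySem.List.foldl_append_singleton_eq_map, List.nil_append,
      PySem.List.pyRange_one]
  simp only [sub_zero, Int.toNat_natCast, List.map_map]
  rw [← pvCounts_eq_map]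
  apply List.map_congr_left
  intro k hk
  simp only [Function.comp_apply, zero_add]
  rw [PySem.List.foldl_pyRange_pyGetD' l ' ' pvStepA (false, 0) (by exact_mod_cast Nat.zero_le k)]
  rw [pvG_fold]
  simp

-- B computes pvCounts
lemma pvB_eq (record : String) :
    find_min_remaining_alt record = pvCounts record.toList := by
  unfold find_min_remaining_alt
  rw [List.foldl_reverse, pvB_foldr]

-- ===== VERDICT (by name: the statement is the Claim_ definition above) =====
theorem find_min_remaining_spec : Claim_equal_find_min_remaining := by
  intro record _
  unfold Spec_find_min_remaining
  rw [pvA_eq, pvB_eq]
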